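-- pv_equiv track=rewrite | github.com/LamarckLab/022_PythonTip_Exercises | 050.py | count_char_occurrences
-- ===== SOURCE A (Python) =====
-- def count_char_occurrences(sentence, char):
--     # 此处编写你的代码
--     sentence = sentence.lower()
--     word_list = sentence.split(" ")
--     cnt_list = []
--     cnt = 0
--     for element in word_list:
--         for digit in element:
--             if digit == char:
--                 cnt += 1
--         cnt_list.append(cnt)
--         cnt = 0
--     return cnt_list
-- ===== SOURCE B (Python) =====
-- def count_char_occurrences(sentence, char):
--     counts = []
--     cnt = 0
--     for c in sentence.lower():
--         if c == " ":
--             counts.append(cnt)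
--             cnt = 0
--         elif c == char:
--             cnt += 1
--     counts.append(cnt)
--     return counts
-- ===== Notes on version B (the rewrite author's own statement) =====
-- stated objective: alternative
-- what changed: Replaces A's split-into-a-word-list plus nested per-word counting loop by a single character scan over the lowered sentence that carries a running count and flushes it at each space (no word list is built).
import Mathlib
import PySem

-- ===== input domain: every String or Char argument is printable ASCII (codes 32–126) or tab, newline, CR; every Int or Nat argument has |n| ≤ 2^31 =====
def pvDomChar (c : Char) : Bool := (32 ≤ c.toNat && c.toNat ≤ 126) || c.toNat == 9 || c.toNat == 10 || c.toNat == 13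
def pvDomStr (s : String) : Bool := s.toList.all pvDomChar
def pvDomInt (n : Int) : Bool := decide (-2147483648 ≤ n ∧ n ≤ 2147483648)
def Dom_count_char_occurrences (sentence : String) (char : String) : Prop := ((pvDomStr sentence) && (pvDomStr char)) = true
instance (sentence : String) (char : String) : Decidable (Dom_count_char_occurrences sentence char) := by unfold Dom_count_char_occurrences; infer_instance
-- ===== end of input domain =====

-- B replaces A's split-into-words plus nested per-word loop by one single scan of the
-- lowered sentence with a running count flushed at each space (objective: alternative).

-- ===== PORT A =====
-- A: lower the sentence, split on " ", then for each word count chars equal to `char`.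
def count_char_occurrences (sentence : String) (char : String) : List Int :=
  let s := (PySem.Str.lower sentence).toList
  let word_list := PySem.Chars.splitOn s [' ']
  let r := word_list.foldl (fun (st : List Int × Int) element =>
      let cnt := element.foldl (fun cnt d => if String.ofList [d] == char then cnt + 1 else cnt) st.2
      (st.1 ++ [cnt], 0)) ([], 0)
  r.1

-- ===== PORT B =====
-- B: one pass over the lowered characters; flush the running count at each space.
def count_char_occurrences_alt (sentence : String) (char : String) : List Int :=
  let r := (PySem.Str.lower sentence).toList.foldl
      (fun (st : List Int × Int) c =>
        if c == ' ' then (st.1 ++ [st.2], 0)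
        else if String.ofList [c] == char then (st.1, st.2 + 1)
        else st) ([], 0)
  r.1 ++ [r.2]

-- ===== PRECONDITION & SPEC =====
def Spec_count_char_occurrences (sentence : String) (char : String) (out : List Int) : Prop := out = count_char_occurrences_alt sentence char
instance (sentence : String) (char : String) (out : List Int) : Decidable (Spec_count_char_occurrences sentence char out) := by unfold Spec_count_char_occurrences; infer_instance

-- ===== CLAIM (what is proved, stated in full; the proofs are below) =====
def Claim_equal_count_char_occurrences : Prop := ∀ (sentence : String) (char : String), Dom_count_char_occurrences sentence char → Spec_count_char_occurrences sentence char (count_char_occurrences sentence char)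

-- ===== LEMMAS AND PROOFS =====

-- Recursive specification of splitting a character list on single spaces.
def wsplit : List Char → List (List Char)
  | [] => [[]]
  | c :: rest => if c = ' ' then [] :: wsplit rest
                 else (c :: (wsplit rest).headI) :: (wsplit rest).tail

theorem wsplit_ne_nil (l : List Char) : wsplit l ≠ [] := by
  cases l with
  | nil => simp [wsplit]
  | cons c rest => simp [wsplit]; split_ifs <;> simp

theorem go_eq : ∀ (n : Nat) (l cur : List Char) (acc : List (List Char)), l.length ≤ n →
    PySem.Chars.splitOn.go [' '] (n+1) l cur acc
      = acc.reverse ++ ((cur.reverse ++ (wsplit l).headI) :: (wsplit l).tail) := by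
  intro n
  induction n with
  | zero =>
    intro l cur acc h
    have : l = [] := List.eq_nil_of_length_eq_zero (Nat.le_zero.mp h)
    subst this
    simp [PySem.Chars.splitOn.go, wsplit]
  | succ m ih =>
    intro l cur acc h
    cases l with
    | nil => simp [PySem.Chars.splitOn.go, wsplit]
    | cons c rest =>
      simp only [PySem.Chars.splitOn.go]
      by_cases hc : c = ' '
      · subst hc
        rw [if_pos (by simp [List.isPrefixOf])]
        simp only [List.length_cons, List.length_nil, List.drop_succ_cons, List.drop_zero]
        rw [ih rest [] _ (by simpa using h)]
        have hne := wsplit_ne_nil rest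
        simp [wsplit, List.headI, List.tail]
        cases hw : wsplit rest with
        | nil => exact absurd hw hne
        | cons w ws => simp
      · rw [if_neg (by simp [List.isPrefixOf]; exact fun he => hc he.symm)]
        rw [ih rest (c :: cur) _ (by simpa using h)]
        simp [wsplit, hc]

theorem splitOn_eq (l : List Char) : PySem.Chars.splitOn l [' '] = wsplit l := by
  unfold PySem.Chars.splitOn
  rw [go_eq l.length l [] [] (le_refl _)]
  have hne := wsplit_ne_nil l
  cases hw : wsplit l with
  | nil => exact absurd hw hne
  | cons w ws => simp

-- Count of characters equal to `char` in a word (A's inner loop seeded with 0).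
def pvCnt (char : String) (w : List Char) : Int :=
  w.foldl (fun cnt d => if String.ofList [d] == char then cnt + 1 else cnt) 0

theorem cnt_shift (char : String) : ∀ (w : List Char) (a : Int),
    w.foldl (fun cnt d => if String.ofList [d] == char then cnt + 1 else cnt) a
      = a + w.foldl (fun cnt d => if String.ofList [d] == char then cnt + 1 else cnt) 0 := by
  intro w
  induction w with
  | nil => intro a; simp
  | cons d w ih =>
    intro a
    simp only [List.foldl_cons]
    rw [ih (if String.ofList [d] == char then a + 1 else a),
        ih (if String.ofList [d] == char then (0:Int) + 1 else 0)]
    split_ifs <;> ring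

theorem pvCnt_cons (char : String) (c : Char) (w : List Char) :
    pvCnt char (c :: w) = (if String.ofList [c] == char then 1 else 0) + pvCnt char w := by
  simp only [pvCnt, List.foldl_cons]
  rw [cnt_shift char w]
  split_ifs <;> ring

theorem a_fold (char : String) : ∀ (ws : List (List Char)) (acc : List Int),
    (ws.foldl (fun (st : List Int × Int) element =>
      let cnt := element.foldl (fun cnt d => if String.ofList [d] == char then cnt + 1 else cnt) st.2
      (st.1 ++ [cnt], 0)) (acc, 0)).1 = acc ++ ws.map (pvCnt char) := by
  intro ws
  induction ws with
  | nil => intro acc; simp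
  | cons w ws ih =>
    intro acc
    simp only [List.foldl_cons, List.map_cons]
    rw [ih]
    simp [pvCnt]

theorem b_fold (char : String) : ∀ (l : List Char) (acc : List Int) (c0 : Int),
    (let r := l.foldl (fun (st : List Int × Int) c =>
        if c == ' ' then (st.1 ++ [st.2], 0)
        else if String.ofList [c] == char then (st.1, st.2 + 1)
        else st) (acc, c0)
     r.1 ++ [r.2])
    = acc ++ ((c0 + pvCnt char (wsplit l).headI) :: ((wsplit l).tail).map (pvCnt char)) := by
  intro l
  induction l with
  | nil => intro acc c0; simp [wsplit, pvCnt]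
  | cons c rest ih =>
    intro acc c0
    simp only [List.foldl_cons]
    by_cases hc : c = ' '
    · subst hc
      simp only [BEq.rfl, if_true]
      rw [ih]
      cases hw : wsplit rest with
      | nil => exact absurd hw (wsplit_ne_nil rest)
      | cons w ws => simp [wsplit, hw, pvCnt]
    · rw [if_neg (by simpa using hc)]
      cases hw : wsplit rest with
      | nil => exact absurd hw (wsplit_ne_nil rest)
      | cons w ws =>
        by_cases hm : (String.ofList [c] == char) = true
        · rw [if_pos hm, ih]
          simp only [wsplit, if_neg hc, hw, List.headI, List.tail, pvCnt_cons, hm,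
            if_true, List.append_cancel_left_eq, List.cons.injEq, and_true]
          ring
        · rw [if_neg hm, ih]
          simp only [wsplit, if_neg hc, hw, List.headI, List.tail, pvCnt_cons, hm]
          simp

-- ===== VERDICT (by name: the statement is the Claim_ definition above) =====
theorem count_char_occurrences_spec : Claim_equal_count_char_occurrences := by
  intro sentence char _
  unfold Spec_count_char_occurrences count_char_occurrences count_char_occurrences_alt
  simp only [splitOn_eq]
  rw [a_fold char, b_fold char]
  have hne := wsplit_ne_nil (PySem.Str.lower sentence).toList
  cases hw : wsplit (PySem.Str.lower sentence).toList with
  | nil => exact absurd hw hne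
  | cons w ws => simp
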